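-- pv_equiv track=rewrite | github.com/MathKode/Tetris-PyGame | code_original/main.py | move_shape
-- ===== SOURCE A (Python) =====
-- def possible_move(area,x,y):
--     result=[] #RIGHT ; LEFT ; BOTTOM
--     try:result.append(area[y][x+1] == 0 and x+1<len(area[0]))
--     except:result.append(False)
--     try:result.append(area[y][x-1] == 0 and x-1>=0)
--     except:result.append(False)
--     try:result.append(area[y+1][x] == 0)
--     except:result.append(False)
--     return result
--
-- def print_shape(area,shape,color):
--     for i in shape:
--         area[i[0]][i[1]] = color
--     return area
--
-- def move_shape(area, active_shape, active_color, direction):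
--     print_shape(area,active_shape,0)
--     result = True
--     for cube in active_shape:
--         move = possible_move(area,cube[1],cube[0])
--         if move[direction] == False:
--             if direction == 0: #RIGHT
--                 if [cube[0],cube[1]+1] not in active_shape:
--                     result=False
--             elif direction == 1: #LEFT
--                 if [cube[0],cube[1]-1] not in active_shape:
--                     result=False
--     if result == True:
--         for cube in active_shape:
--             if direction==0:
--                 cube[1] += 1
--             elif direction==1:
--                 cube[1] -=1
--     print_shape(area,active_shape,active_color)
--     return active_shape, area
-- ===== SOURCE B (Python) =====
-- def move_shape(area, active_shape, active_color, direction):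
--     # Decide the move by checking only the leading-edge target cells (shifted shape
--     # minus shape, a set difference) against the live board -- no erase-to-0 /
--     # possible_move probe / repaint dance -- then update the board by delta:
--     # zero only the vacated cells and paint the shape once.  Mutates area and
--     # active_shape in place like A; equivalence claimed for the return value.
--     dx = 1 if direction == 0 else (-1 if direction == 1 else 0)
--     old = {(c[0], c[1]) for c in active_shape}
--     new = old
--     if dx != 0:
--         cols = len(area[0]) if area else 0
--         edge = {(y, x + dx) for (y, x) in old} - old
--         if all(0 <= y < len(area) and 0 <= x < cols and area[y][x] == 0
--                for (y, x) in edge):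
--             new = {(y, x + dx) for (y, x) in old}
--             for c in active_shape:
--                 c[1] += dx
--     for y, x in old - new:
--         area[y][x] = 0
--     for c in active_shape:
--         area[c[0]][c[1]] = active_color
--     return active_shape, area
-- ===== Notes on version B (the rewrite author's own statement) =====
-- stated objective: alternative
-- what changed: B replaces A's erase-to-0 / per-cube possible_move probe / repaint dance by set algebra on cell sets: it checks only the leading-edge target cells (the shifted shape minus the shape, a set difference) against the live board, then updates the board by delta, zeroing only the vacated cells (old minus new) and painting the shape once.
-- outside the precondition, e.g. on move_shape([[0, 0], [0]], [[1, 0]], 7, 0): A returns ([[1, 0]], [[0, 0], [7]]), B raises IndexError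
import Mathlib
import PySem

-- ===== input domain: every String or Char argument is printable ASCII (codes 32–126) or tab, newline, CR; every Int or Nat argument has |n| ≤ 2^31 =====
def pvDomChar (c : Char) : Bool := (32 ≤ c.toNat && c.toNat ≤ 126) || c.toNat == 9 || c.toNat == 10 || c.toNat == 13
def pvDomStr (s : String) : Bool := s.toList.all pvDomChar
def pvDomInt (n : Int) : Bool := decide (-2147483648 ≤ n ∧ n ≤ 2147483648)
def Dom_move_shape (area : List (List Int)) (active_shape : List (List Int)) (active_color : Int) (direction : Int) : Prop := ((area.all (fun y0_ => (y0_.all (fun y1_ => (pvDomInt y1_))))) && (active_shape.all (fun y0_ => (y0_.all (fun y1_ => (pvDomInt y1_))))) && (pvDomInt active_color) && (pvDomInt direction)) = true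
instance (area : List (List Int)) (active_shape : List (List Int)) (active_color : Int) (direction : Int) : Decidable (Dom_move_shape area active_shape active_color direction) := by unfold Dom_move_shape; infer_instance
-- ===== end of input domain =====

-- B replaces A's erase-to-0 / per-cube possible_move probe / repaint dance by set algebra on cell
-- sets: it checks only the leading-edge target cells (shifted shape minus shape, a set difference)
-- against the live board, then updates the board by delta, zeroing only the vacated cells (old minus
-- new) and painting the shape once (objective: alternative). Both Pythons mutate area and
-- active_shape in place identically; the equality proved here is about the returned value.

-- a[y][x] = v  (Python item assignment on a list of lists; used by port A)
def pvCell (a : List (List Int)) (y x v : Int) : List (List Int) :=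
  PySem.List.pySetD a y (PySem.List.pySetD (PySem.List.pyGetD a y []) x v)

-- ===== PORT A =====
-- possible_move(area, x, y): three try/except entries; the `none` branches are the exception paths
def pvPossibleMove (area : List (List Int)) (x y : Int) : List Bool :=
  let r :=
    match PySem.List.pyGet? area y with
    | none => false
    | some row =>
      match PySem.List.pyGet? row (x + 1) with
      | none => false
      | some v => decide (v = 0) && decide (x + 1 < ((PySem.List.pyGetD area 0 []).length : Int))
  let l :=
    match PySem.List.pyGet? area y with
    | none => false
    | some row =>
      match PySem.List.pyGet? row (x - 1) with
      | none => false
      | some v => decide (v = 0) && decide (0 ≤ x - 1)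
  let b :=
    match PySem.List.pyGet? area (y + 1) with
    | none => false
    | some row =>
      match PySem.List.pyGet? row x with
      | none => false
      | some v => decide (v = 0)
  [r, l, b]

-- print_shape(area, shape, color)
def pvPrintShape (area : List (List Int)) (shape : List (List Int)) (color : Int) : List (List Int) :=
  shape.foldl (fun a c => pvCell a (PySem.List.pyGetD c 0 0) (PySem.List.pyGetD c 1 0) color) area

def move_shape (area : List (List Int)) (active_shape : List (List Int)) (active_color : Int) (direction : Int) : List (List Int) × List (List Int) :=
  let area1 := pvPrintShape area active_shape 0
  let result := active_shape.foldl (fun res c =>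
    let mv := pvPossibleMove area1 (PySem.List.pyGetD c 1 0) (PySem.List.pyGetD c 0 0)
    if PySem.List.pyGetD mv direction false = false then
      if direction = 0 then
        if [PySem.List.pyGetD c 0 0, PySem.List.pyGetD c 1 0 + 1] ∈ active_shape then res else false
      else if direction = 1 then
        if [PySem.List.pyGetD c 0 0, PySem.List.pyGetD c 1 0 - 1] ∈ active_shape then res else false
      else res
    else res) true
  let shape2 :=
    if result then
      active_shape.map (fun c =>
        if direction = 0 then PySem.List.pySetD c 1 (PySem.List.pyGetD c 1 0 + 1)
        else if direction = 1 then PySem.List.pySetD c 1 (PySem.List.pyGetD c 1 0 - 1)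
        else c)
    else active_shape
  (shape2, pvPrintShape area1 shape2 active_color)

-- ===== PORT B =====
def move_shape_alt (area : List (List Int)) (active_shape : List (List Int)) (active_color : Int) (direction : Int) : List (List Int) × List (List Int) :=
  let dx : Int := if direction = 0 then 1 else if direction = 1 then -1 else 0
  let old : PySem.Set (Int × Int) :=
    PySem.Set.ofList (active_shape.map (fun c => (PySem.List.pyGetD c 0 0, PySem.List.pyGetD c 1 0)))
  let moved : Bool :=
    decide (dx ≠ 0) &&
      (let cols : Int := if area = [] then 0 else ((area.headD []).length : Int)
       (PySem.Set.diff (PySem.Set.ofList (old.map (fun p => (p.1, p.2 + dx)))) old).all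
         (fun p => decide (0 ≤ p.1) && decide (p.1 < (area.length : Int)) &&
                   decide (0 ≤ p.2) && decide (p.2 < cols) &&
                   decide (PySem.List.pyGetD (PySem.List.pyGetD area p.1 []) p.2 0 = 0)))
  let neu : PySem.Set (Int × Int) :=
    if moved then PySem.Set.ofList (old.map (fun p => (p.1, p.2 + dx))) else old
  let shape2 :=
    if moved then active_shape.map (fun c => PySem.List.pySetD c 1 (PySem.List.pyGetD c 1 0 + dx))
    else active_shape
  let area1 := (PySem.Set.diff old neu).foldl (fun a p => pvCell a p.1 p.2 0) area
  let area2 := shape2.foldl (fun a c =>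
    pvCell a (PySem.List.pyGetD c 0 0) (PySem.List.pyGetD c 1 0) active_color) area1
  (shape2, area2)

-- ===== PRECONDITION & SPEC =====
-- Pre_ excludes: inputs where A raises (a direction outside -3..2 reaching move[direction], a cube
-- shorter than two entries, or a cube whose write area[c0][c1] is outside Python's wrap range); and,
-- among inputs where A returns, for the two real moves (direction 0/1) only, cubes off the grid
-- (A then indexes through Python's negative-index wraparound, an accident of list indexing) and
-- non-rectangular grids (A mixes a len(area[0]) bound with reads of the cube's own row).
def Pre_move_shape (area : List (List Int)) (active_shape : List (List Int)) (active_color : Int) (direction : Int) : Prop :=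
  active_shape = [] ∨
  ((-3 ≤ direction ∧ direction ≤ 2) ∧
   (∀ c ∈ active_shape, 2 ≤ c.length ∧ PySem.Raise.InRange area.length (c.getD 0 0) ∧
       PySem.Raise.InRange (PySem.List.pyGetD area (c.getD 0 0) []).length (c.getD 1 0)) ∧
   ((direction = 0 ∨ direction = 1) →
     (∀ row ∈ area, row.length = (area.headD []).length) ∧
     (∀ c ∈ active_shape, 0 ≤ c.getD 0 0 ∧ c.getD 0 0 < (area.length : Int) ∧
         0 ≤ c.getD 1 0 ∧ c.getD 1 0 < ((area.headD []).length : Int))))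
instance (area : List (List Int)) (active_shape : List (List Int)) (active_color : Int) (direction : Int) : Decidable (Pre_move_shape area active_shape active_color direction) := by unfold Pre_move_shape; infer_instance

def pvWitness_move_shape : List (List Int) × List (List Int) × Int × Int :=
  ([[0, 0, 5], [0, 0, 0]], [[0, 0], [0, 1]], 7, 0)

def Spec_move_shape (area : List (List Int)) (active_shape : List (List Int)) (active_color : Int) (direction : Int) (out : List (List Int) × List (List Int)) : Prop := out = move_shape_alt area active_shape active_color direction
instance (area : List (List Int)) (active_shape : List (List Int)) (active_color : Int) (direction : Int) (out : List (List Int) × List (List Int)) : Decidable (Spec_move_shape area active_shape active_color direction out) := by unfold Spec_move_shape; infer_instance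

-- ===== CLAIM (what is proved, stated in full; the proofs are below) =====
def Claim_equal_move_shape : Prop := ∀ (area : List (List Int)) (active_shape : List (List Int)) (active_color : Int) (direction : Int), Dom_move_shape area active_shape active_color direction → Pre_move_shape area active_shape active_color direction → Spec_move_shape area active_shape active_color direction (move_shape area active_shape active_color direction)

-- ===== LEMMAS AND PROOFS =====

-- reading / measuring a board cell and a row, Python-style
def pvRead (a : List (List Int)) (y x : Int) : Int :=
  PySem.List.pyGetD (PySem.List.pyGetD a y []) x 0

def pvRowLen (a : List (List Int)) (y : Int) : Nat :=
  (PySem.List.pyGetD a y []).length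

lemma pvGetD_nonneg {α : Type} (xs : List α) {i : Int} (d : α) (h : 0 ≤ i) :
    PySem.List.pyGetD xs i d = xs[i.toNat]?.getD d := by
  simp [PySem.List.pyGetD, PySem.List.pyGet?_of_nonneg xs h]

lemma length_pvCell (a : List (List Int)) (y x v : Int) : (pvCell a y x v).length = a.length := by
  simp [pvCell, PySem.List.length_pySetD]

lemma rowLen_pvCell (a : List (List Int)) (y' x' v : Int) {y : Int} (hy' : 0 ≤ y') (hy : 0 ≤ y) :
    pvRowLen (pvCell a y' x' v) y = pvRowLen a y := by
  unfold pvRowLen pvCell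
  rw [PySem.List.pySetD_of_nonneg _ _ hy', pvGetD_nonneg _ _ hy, pvGetD_nonneg _ _ hy]
  rw [List.getElem?_set]
  split_ifs with h1 h2
  · rw [← h1]
    simp [PySem.List.length_pySetD, pvGetD_nonneg _ ([] : List Int) hy']
  · rw [← h1, List.getElem?_eq_none (by omega)]
  · rfl

lemma read_pvCell (a : List (List Int)) {y' x' : Int} (v : Int) {y x : Int}
    (hy' : 0 ≤ y') (hy'2 : y' < (a.length : Int)) (hx' : 0 ≤ x') (hx'2 : x' < (pvRowLen a y' : Int))
    (hy : 0 ≤ y) (hx : 0 ≤ x) :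
    pvRead (pvCell a y' x' v) y x = if y = y' ∧ x = x' then v else pvRead a y x := by
  unfold pvRead pvCell pvRowLen at *
  rw [PySem.List.pySetD_of_nonneg _ _ hy', PySem.List.pySetD_of_nonneg _ _ hx',
    pvGetD_nonneg _ _ hy, pvGetD_nonneg _ _ hy, pvGetD_nonneg _ _ hy']
  rw [List.getElem?_set]
  by_cases hyy : y = y'
  · subst hyy
    rw [if_pos rfl]
    simp only [true_and]
    have hlt : y.toNat < a.length := by omega
    rw [if_pos hlt]
    simp only [Option.getD_some]
    rw [pvGetD_nonneg _ _ hx, List.getElem?_set]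
    rw [pvGetD_nonneg _ _ hy] at hx'2
    by_cases hxx : x = x'
    · subst hxx
      rw [if_pos rfl, if_pos (by omega)]
      simp
    · rw [if_neg (by omega), if_neg hxx, pvGetD_nonneg _ _ hx]
  · rw [if_neg (by omega), if_neg (by simp [hyy]), pvGetD_nonneg _ _ hx]

lemma pvFold_struct (g0 g1 : List Int → Int) (v : Int) (shape : List (List Int)) :
    ∀ a : List (List Int), (∀ c ∈ shape, 0 ≤ g0 c) →
    (shape.foldl (fun a c => pvCell a (g0 c) (g1 c) v) a).length = a.length ∧
    (∀ y : Int, 0 ≤ y → pvRowLen (shape.foldl (fun a c => pvCell a (g0 c) (g1 c) v) a) y = pvRowLen a y) := by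
  induction shape with
  | nil => simp
  | cons c t ih =>
    intro a hb
    simp only [List.foldl_cons]
    obtain ⟨h1, h2⟩ := ih (pvCell a (g0 c) (g1 c) v) (fun c' hc' => hb c' (List.mem_cons_of_mem _ hc'))
    refine ⟨by rw [h1, length_pvCell], fun y hy => ?_⟩
    rw [h2 y hy, rowLen_pvCell _ _ _ _ (hb c (by simp)) hy]

lemma pvFold_read (g0 g1 : List Int → Int) (v : Int) (shape : List (List Int)) :
    ∀ a : List (List Int),
    (∀ c ∈ shape, 0 ≤ g0 c ∧ g0 c < (a.length : Int) ∧ 0 ≤ g1 c ∧ g1 c < (pvRowLen a (g0 c) : Int)) →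
    ∀ y x : Int, 0 ≤ y → 0 ≤ x →
    pvRead (shape.foldl (fun a c => pvCell a (g0 c) (g1 c) v) a) y x
      = if ∃ c ∈ shape, g0 c = y ∧ g1 c = x then v else pvRead a y x := by
  induction shape with
  | nil => simp
  | cons c t ih =>
    intro a hb y x hy hx
    simp only [List.foldl_cons]
    have hc := hb c (by simp)
    have ha' : ∀ c' ∈ t, 0 ≤ g0 c' ∧ g0 c' < ((pvCell a (g0 c) (g1 c) v).length : Int) ∧
        0 ≤ g1 c' ∧ g1 c' < (pvRowLen (pvCell a (g0 c) (g1 c) v) (g0 c') : Int) := by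
      intro c' hc'
      have h := hb c' (List.mem_cons_of_mem _ hc')
      refine ⟨h.1, ?_, h.2.2.1, ?_⟩
      · rw [length_pvCell]; exact h.2.1
      · rw [rowLen_pvCell _ _ _ _ hc.1 h.1]; exact h.2.2.2
    rw [ih _ ha' y x hy hx]
    by_cases hmem : ∃ c' ∈ t, g0 c' = y ∧ g1 c' = x
    · rw [if_pos hmem]
      obtain ⟨c', hc', h1, h2⟩ := hmem
      rw [if_pos ⟨c', List.mem_cons_of_mem _ hc', h1, h2⟩]
    · rw [if_neg hmem, read_pvCell a v hc.1 hc.2.1 hc.2.2.1 hc.2.2.2 hy hx]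
      by_cases he : y = g0 c ∧ x = g1 c
      · rw [if_pos he, if_pos ⟨c, by simp, he.1.symm, he.2.symm⟩]
      · rw [if_neg he, if_neg ?_]
        rintro ⟨c', hc', h1, h2⟩
        rcases List.mem_cons.mp hc' with rfl | hm
        · exact he ⟨h1.symm, h2.symm⟩
        · exact hmem ⟨c', hm, h1, h2⟩

lemma rowlen_rect (area : List (List Int)) (hrect : ∀ row ∈ area, row.length = (area.headD []).length)
    {y : Int} (hy : 0 ≤ y) (hy2 : y < (area.length : Int)) :
    pvRowLen area y = (area.headD []).length := by
  unfold pvRowLen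
  rw [pvGetD_nonneg _ _ hy]
  have h : y.toNat < area.length := by omega
  rw [List.getElem?_eq_getElem h]
  exact hrect _ (List.getElem_mem h)

-- entries of possible_move

lemma pvMv0 (area : List (List Int)) (x y : Int) :
    PySem.List.pyGetD (pvPossibleMove area x y) 0 false =
      (match PySem.List.pyGet? area y with
       | none => false
       | some row =>
         match PySem.List.pyGet? row (x + 1) with
         | none => false
         | some v => decide (v = 0) && decide (x + 1 < ((PySem.List.pyGetD area 0 []).length : Int))) := rfl

lemma pvMv1 (area : List (List Int)) (x y : Int) :
    PySem.List.pyGetD (pvPossibleMove area x y) 1 false =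
      (match PySem.List.pyGet? area y with
       | none => false
       | some row =>
         match PySem.List.pyGet? row (x - 1) with
         | none => false
         | some v => decide (v = 0) && decide (0 ≤ x - 1)) := rfl

lemma pvKeyR (area shape : List (List Int))
    (hrect : ∀ row ∈ area, row.length = (area.headD []).length)
    (hb : ∀ c ∈ shape, 0 ≤ PySem.List.pyGetD c 0 0 ∧ PySem.List.pyGetD c 0 0 < (area.length : Int) ∧
        0 ≤ PySem.List.pyGetD c 1 0 ∧ PySem.List.pyGetD c 1 0 < ((area.headD []).length : Int))
    {y x : Int} (hy : 0 ≤ y) (hy2 : y < (area.length : Int)) (hx : 0 ≤ x)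
    (hx2 : x < ((area.headD []).length : Int)) :
    (!(decide (PySem.List.pyGetD (pvPossibleMove (pvPrintShape area shape 0) x y) 0 false = false) &&
       !decide ([y, x + 1] ∈ shape)))
    = ((decide (0 ≤ y) && decide (y < (area.length : Int)) && decide (0 ≤ x + 1) &&
        decide (x + 1 < ((PySem.List.pyGetD area y []).length : Int)) &&
        decide (PySem.List.pyGetD (PySem.List.pyGetD area y []) (x + 1) 0 = 0)) ||
       decide ((y, x + 1) ∈ shape.map (fun c => (PySem.List.pyGetD c 0 0, PySem.List.pyGetD c 1 0)))) := by
  have hg0 : ∀ c ∈ shape, 0 ≤ PySem.List.pyGetD c 0 0 := fun c h => (hb c h).1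
  have hstruct := pvFold_struct (fun c => PySem.List.pyGetD c 0 0) (fun c => PySem.List.pyGetD c 1 0) 0 shape area hg0
  have hlen1 : (pvPrintShape area shape 0).length = area.length := hstruct.1
  have hrl1 : ∀ z : Int, 0 ≤ z → pvRowLen (pvPrintShape area shape 0) z = pvRowLen area z := hstruct.2
  have hcols : pvRowLen area y = (area.headD []).length := rowlen_rect area hrect hy hy2
  have hbb : ∀ c ∈ shape, 0 ≤ PySem.List.pyGetD c 0 0 ∧ PySem.List.pyGetD c 0 0 < (area.length : Int) ∧
      0 ≤ PySem.List.pyGetD c 1 0 ∧ PySem.List.pyGetD c 1 0 < (pvRowLen area (PySem.List.pyGetD c 0 0) : Int) := by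
    intro c hc
    have h := hb c hc
    exact ⟨h.1, h.2.1, h.2.2.1, by rw [rowlen_rect area hrect h.1 h.2.1]; exact h.2.2.2⟩
  have hread : pvRead (pvPrintShape area shape 0) y (x + 1) =
      (if ∃ c ∈ shape, PySem.List.pyGetD c 0 0 = y ∧ PySem.List.pyGetD c 1 0 = x + 1 then 0
       else pvRead area y (x + 1)) :=
    pvFold_read (fun c => PySem.List.pyGetD c 0 0) (fun c => PySem.List.pyGetD c 1 0) 0 shape area hbb
      y (x + 1) hy (by omega)
  have hmemiff : ∀ (t : Int), ((y, t) ∈ shape.map (fun c => (PySem.List.pyGetD c 0 0, PySem.List.pyGetD c 1 0)))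
      ↔ (∃ c ∈ shape, PySem.List.pyGetD c 0 0 = y ∧ PySem.List.pyGetD c 1 0 = t) := by
    intro t
    rw [List.mem_map]
    constructor
    · rintro ⟨c, hc, hpair⟩
      exact ⟨c, hc, congrArg Prod.fst hpair, congrArg Prod.snd hpair⟩
    · rintro ⟨c, hc, h1, h2⟩
      exact ⟨c, hc, by rw [h1, h2]⟩
  have hlistmem : ([y, x + 1] ∈ shape) →
      ((y, x + 1) ∈ shape.map (fun c => (PySem.List.pyGetD c 0 0, PySem.List.pyGetD c 1 0))) := by
    intro h
    exact List.mem_map.mpr ⟨[y, x + 1], h, rfl⟩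
  have hy1 : pvRowLen (pvPrintShape area shape 0) y = (area.headD []).length := by
    rw [hrl1 y hy, hcols]
  have hyN : y.toNat < (pvPrintShape area shape 0).length := by omega
  have hrow1 : (pvPrintShape area shape 0)[y.toNat] = PySem.List.pyGetD (pvPrintShape area shape 0) y [] := by
    rw [pvGetD_nonneg _ _ hy, List.getElem?_eq_getElem hyN]
    rfl
  have hrow1len : (pvPrintShape area shape 0)[y.toNat].length = (area.headD []).length := by
    rw [hrow1]; exact hy1
  have hrow0 : (PySem.List.pyGetD (pvPrintShape area shape 0) 0 []).length = (area.headD []).length := by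
    have h1 := hrl1 0 le_rfl
    have h0 : pvRowLen area 0 = (area.headD []).length := rowlen_rect area hrect le_rfl (by omega)
    unfold pvRowLen at h1 h0
    rw [h1, h0]
  have hrl : ((PySem.List.pyGetD area y []).length : Int) = ((area.headD []).length : Int) := by
    unfold pvRowLen at hcols; rw [hcols]
  rcases hopt : (pvPrintShape area shape 0)[y.toNat][(x + 1).toNat]? with _ | v
  · -- IndexError: target column out of range → blocked; B: bound test fails, pair not in shape
    have hA : PySem.List.pyGetD (pvPossibleMove (pvPrintShape area shape 0) x y) 0 false = false := by
      rw [pvMv0, PySem.List.pyGet?_of_nonneg _ hy, List.getElem?_eq_getElem hyN]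
      dsimp only
      rw [PySem.List.pyGet?_of_nonneg _ (by omega : (0:Int) ≤ x + 1), hopt]
    have ht : ¬ (x + 1 < ((area.headD []).length : Int)) := by
      rw [List.getElem?_eq_none_iff, hrow1len] at hopt
      omega
    have hpm : ¬ ((y, x + 1) ∈ shape.map (fun c => (PySem.List.pyGetD c 0 0, PySem.List.pyGetD c 1 0))) := by
      intro h
      obtain ⟨c, hc, h1, h2⟩ := (hmemiff (x + 1)).mp h
      have := (hb c hc).2.2.2
      omega
    have hlm : ¬ ([y, x + 1] ∈ shape) := fun h => hpm (hlistmem h)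
    rw [hA]
    rw [List.headD_eq_head?_getD] at ht
    simp [hpm, hlm, hrl]
    intro _ _ _ h4
    exact absurd h4 ht
  · -- target column readable: v is the erased board's cell
    have htN : (x + 1).toNat < (pvPrintShape area shape 0)[y.toNat].length :=
      List.getElem?_eq_some_iff.mp hopt |>.1
    have ht : x + 1 < ((area.headD []).length : Int) := by
      rw [hrow1len] at htN; omega
    have hv : v = pvRead (pvPrintShape area shape 0) y (x + 1) := by
      unfold pvRead
      rw [← hrow1, pvGetD_nonneg _ _ (by omega : (0:Int) ≤ x + 1), hopt]
      rfl
    have hA : PySem.List.pyGetD (pvPossibleMove (pvPrintShape area shape 0) x y) 0 false =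
        (decide (v = 0) && decide (x + 1 < ((PySem.List.pyGetD (pvPrintShape area shape 0) 0 []).length : Int))) := by
      rw [pvMv0, PySem.List.pyGet?_of_nonneg _ hy, List.getElem?_eq_getElem hyN]
      dsimp only
      rw [PySem.List.pyGet?_of_nonneg _ (by omega : (0:Int) ≤ x + 1), hopt]
    rw [hA, hv, hread]
    by_cases hmem : ∃ c ∈ shape, PySem.List.pyGetD c 0 0 = y ∧ PySem.List.pyGetD c 1 0 = x + 1
    · rw [if_pos hmem]
      have hpm : ((y, x + 1) ∈ shape.map (fun c => (PySem.List.pyGetD c 0 0, PySem.List.pyGetD c 1 0))) :=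
        (hmemiff (x + 1)).mpr hmem
      rw [List.headD_eq_head?_getD] at ht
      simp [hpm, hrow0, ht]
    · rw [if_neg hmem]
      have hpm : ¬ ((y, x + 1) ∈ shape.map (fun c => (PySem.List.pyGetD c 0 0, PySem.List.pyGetD c 1 0))) :=
        fun h => hmem ((hmemiff (x + 1)).mp h)
      have hlm : ¬ ([y, x + 1] ∈ shape) := fun h => hpm (hlistmem h)
      rw [List.headD_eq_head?_getD] at ht
      simp only [hpm, hlm, hrow0, hrl, decide_false, Bool.not_false, Bool.and_true, Bool.or_false]
      simp [hy, hy2, ht]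
      by_cases hz : PySem.List.pyGetD (PySem.List.pyGetD area y []) (x + 1) 0 = 0 <;> simp [pvRead, hz]
      omega

lemma pvKeyL (area shape : List (List Int))
    (hrect : ∀ row ∈ area, row.length = (area.headD []).length)
    (hb : ∀ c ∈ shape, 0 ≤ PySem.List.pyGetD c 0 0 ∧ PySem.List.pyGetD c 0 0 < (area.length : Int) ∧
        0 ≤ PySem.List.pyGetD c 1 0 ∧ PySem.List.pyGetD c 1 0 < ((area.headD []).length : Int))
    {y x : Int} (hy : 0 ≤ y) (hy2 : y < (area.length : Int)) (hx : 0 ≤ x)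
    (hx2 : x < ((area.headD []).length : Int)) :
    (!(decide (PySem.List.pyGetD (pvPossibleMove (pvPrintShape area shape 0) x y) 1 false = false) &&
       !decide ([y, x - 1] ∈ shape)))
    = ((decide (0 ≤ y) && decide (y < (area.length : Int)) && decide (0 ≤ x - 1) &&
        decide (x - 1 < ((PySem.List.pyGetD area y []).length : Int)) &&
        decide (PySem.List.pyGetD (PySem.List.pyGetD area y []) (x - 1) 0 = 0)) ||
       decide ((y, x - 1) ∈ shape.map (fun c => (PySem.List.pyGetD c 0 0, PySem.List.pyGetD c 1 0)))) := by
  have hg0 : ∀ c ∈ shape, 0 ≤ PySem.List.pyGetD c 0 0 := fun c h => (hb c h).1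
  have hstruct := pvFold_struct (fun c => PySem.List.pyGetD c 0 0) (fun c => PySem.List.pyGetD c 1 0) 0 shape area hg0
  have hrl1 : ∀ z : Int, 0 ≤ z → pvRowLen (pvPrintShape area shape 0) z = pvRowLen area z := hstruct.2
  have hcols : pvRowLen area y = (area.headD []).length := rowlen_rect area hrect hy hy2
  have hbb : ∀ c ∈ shape, 0 ≤ PySem.List.pyGetD c 0 0 ∧ PySem.List.pyGetD c 0 0 < (area.length : Int) ∧
      0 ≤ PySem.List.pyGetD c 1 0 ∧ PySem.List.pyGetD c 1 0 < (pvRowLen area (PySem.List.pyGetD c 0 0) : Int) := by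
    intro c hc
    have h := hb c hc
    exact ⟨h.1, h.2.1, h.2.2.1, by rw [rowlen_rect area hrect h.1 h.2.1]; exact h.2.2.2⟩
  have hmemiff : ∀ (t : Int), ((y, t) ∈ shape.map (fun c => (PySem.List.pyGetD c 0 0, PySem.List.pyGetD c 1 0)))
      ↔ (∃ c ∈ shape, PySem.List.pyGetD c 0 0 = y ∧ PySem.List.pyGetD c 1 0 = t) := by
    intro t
    rw [List.mem_map]
    constructor
    · rintro ⟨c, hc, hpair⟩
      exact ⟨c, hc, congrArg Prod.fst hpair, congrArg Prod.snd hpair⟩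
    · rintro ⟨c, hc, h1, h2⟩
      exact ⟨c, hc, by rw [h1, h2]⟩
  have hlistmem : ([y, x - 1] ∈ shape) →
      ((y, x - 1) ∈ shape.map (fun c => (PySem.List.pyGetD c 0 0, PySem.List.pyGetD c 1 0))) := by
    intro h
    exact List.mem_map.mpr ⟨[y, x - 1], h, rfl⟩
  have hy1 : pvRowLen (pvPrintShape area shape 0) y = (area.headD []).length := by
    rw [hrl1 y hy, hcols]
  have hlen1 : (pvPrintShape area shape 0).length = area.length := hstruct.1
  have hyN : y.toNat < (pvPrintShape area shape 0).length := by omega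
  have hrow1 : (pvPrintShape area shape 0)[y.toNat] = PySem.List.pyGetD (pvPrintShape area shape 0) y [] := by
    rw [pvGetD_nonneg _ _ hy, List.getElem?_eq_getElem hyN]
    rfl
  have hrow1len : (pvPrintShape area shape 0)[y.toNat].length = (area.headD []).length := by
    rw [hrow1]; exact hy1
  have hrl : ((PySem.List.pyGetD area y []).length : Int) = ((area.headD []).length : Int) := by
    unfold pvRowLen at hcols; rw [hcols]
  by_cases hx0 : x - 1 < 0
  · -- x == 0 in Python: x-1 = -1 wraps, but the `x-1>=0` conjunct kills the entry → blocked
    have hA : PySem.List.pyGetD (pvPossibleMove (pvPrintShape area shape 0) x y) 1 false = false := by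
      rw [pvMv1, PySem.List.pyGet?_of_nonneg _ hy, List.getElem?_eq_getElem hyN]
      dsimp only
      cases hget : PySem.List.pyGet? (pvPrintShape area shape 0)[y.toNat] (x - 1) with
      | none => rfl
      | some v =>
        dsimp only
        simp only [Bool.and_eq_false_iff, decide_eq_false_iff_not]
        right
        omega
    have hpm : ¬ ((y, x - 1) ∈ shape.map (fun c => (PySem.List.pyGetD c 0 0, PySem.List.pyGetD c 1 0))) := by
      intro h
      obtain ⟨c, hc, h1, h2⟩ := (hmemiff (x - 1)).mp h
      have := (hb c hc).2.2.1
      omega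
    have hlm : ¬ ([y, x - 1] ∈ shape) := fun h => hpm (hlistmem h)
    rw [hA]
    simp [hpm, hlm]
    omega
  · -- 1 <= x: ordinary in-range read of the erased board
    have hread : pvRead (pvPrintShape area shape 0) y (x - 1) =
        (if ∃ c ∈ shape, PySem.List.pyGetD c 0 0 = y ∧ PySem.List.pyGetD c 1 0 = x - 1 then 0
         else pvRead area y (x - 1)) :=
      pvFold_read (fun c => PySem.List.pyGetD c 0 0) (fun c => PySem.List.pyGetD c 1 0) 0 shape area hbb
        y (x - 1) hy (by omega)
    have htN : (x - 1).toNat < (pvPrintShape area shape 0)[y.toNat].length := by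
      rw [hrow1len]; omega
    have hA : PySem.List.pyGetD (pvPossibleMove (pvPrintShape area shape 0) x y) 1 false =
        (decide ((pvPrintShape area shape 0)[y.toNat][(x - 1).toNat] = 0) && decide (0 ≤ x - 1)) := by
      rw [pvMv1, PySem.List.pyGet?_of_nonneg _ hy, List.getElem?_eq_getElem hyN]
      dsimp only
      rw [PySem.List.pyGet?_of_nonneg _ (by omega : (0:Int) ≤ x - 1), List.getElem?_eq_getElem htN]
    have hv : (pvPrintShape area shape 0)[y.toNat][(x - 1).toNat] = pvRead (pvPrintShape area shape 0) y (x - 1) := by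
      unfold pvRead
      rw [← hrow1, pvGetD_nonneg _ _ (by omega : (0:Int) ≤ x - 1), List.getElem?_eq_getElem htN]
      rfl
    rw [hA, hv, hread]
    by_cases hmem : ∃ c ∈ shape, PySem.List.pyGetD c 0 0 = y ∧ PySem.List.pyGetD c 1 0 = x - 1
    · rw [if_pos hmem]
      have hpm : ((y, x - 1) ∈ shape.map (fun c => (PySem.List.pyGetD c 0 0, PySem.List.pyGetD c 1 0))) :=
        (hmemiff (x - 1)).mpr hmem
      simp [hpm]
      exact Or.inl (by omega)
    · rw [if_neg hmem]
      have hpm : ¬ ((y, x - 1) ∈ shape.map (fun c => (PySem.List.pyGetD c 0 0, PySem.List.pyGetD c 1 0))) :=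
        fun h => hmem ((hmemiff (x - 1)).mp h)
      have hlm : ¬ ([y, x - 1] ∈ shape) := fun h => hpm (hlistmem h)
      simp only [hpm, hlm, hrl, decide_false, Bool.not_false, Bool.and_true, Bool.or_false]
      simp [hy, hy2]
      have hxc : x ≤ ((area.head?.getD [] : List Int).length : Int) := by
        rw [← List.headD_eq_head?_getD]; omega
      by_cases hz : PySem.List.pyGetD (PySem.List.pyGetD area y []) (x - 1) 0 = 0 <;>
        simp [pvRead, hz, hxc, show ¬ (x < 1) from by omega, show (1:Int) ≤ x from by omega]

-- wrap-aware (Python negative-index) board machinery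
lemma pvRead_eq_getElem (a : List (List Int)) (yN xN : Nat) (hy : yN < a.length)
    (hx : xN < (a[yN]'hy).length) : pvRead a (yN : Int) (xN : Int) = (a[yN]'hy)[xN]'hx := by
  unfold pvRead
  rw [pvGetD_nonneg _ _ (Int.natCast_nonneg yN), Int.toNat_natCast, List.getElem?_eq_getElem hy]
  simp only [Option.getD_some]
  rw [pvGetD_nonneg _ _ (Int.natCast_nonneg xN), Int.toNat_natCast, List.getElem?_eq_getElem hx]
  rfl

-- normalized (Python-wrapped) index
def pvIdx (n : Nat) (i : Int) : Nat := if 0 ≤ i then i.toNat else n - (-i).toNat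

lemma pvIdx_lt (n : Nat) (i : Int) (h : PySem.Raise.InRange n i) : pvIdx n i < n := by
  obtain ⟨h1, h2⟩ := h
  unfold pvIdx
  split_ifs with h0 <;> omega

lemma pyIdx?_wrap (n : Nat) (i : Int) (h : PySem.Raise.InRange n i) :
    PySem.List.pyIdx? n i = some (pvIdx n i) := by
  obtain ⟨h1, h2⟩ := h
  unfold PySem.List.pyIdx? pvIdx
  split_ifs <;> first | rfl | omega

lemma pyIdx?_lt (n : Nat) (i : Int) (k : Nat) (h : PySem.List.pyIdx? n i = some k) : k < n := by
  unfold PySem.List.pyIdx? at h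
  split_ifs at h <;> cases h <;> omega

lemma pySetD_wrap {α : Type} (xs : List α) (i : Int) (v : α) (h : PySem.Raise.InRange xs.length i) :
    PySem.List.pySetD xs i v = xs.set (pvIdx xs.length i) v := by
  simp [PySem.List.pySetD, PySem.List.pySet?, pyIdx?_wrap _ _ h]

lemma pyGetD_of_idx {α : Type} (xs : List α) (i : Int) (d : α) (k : Nat)
    (h : PySem.List.pyIdx? xs.length i = some k) (hk : k < xs.length) :
    PySem.List.pyGetD xs i d = xs[k]'hk := by
  simp [PySem.List.pyGetD, PySem.List.pyGet?, h, List.getElem?_eq_getElem hk]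

def pvRowN (a : List (List Int)) (iN : Nat) : List Int := (a[iN]?).getD []

lemma pvRowN_eq (a : List (List Int)) (iN : Nat) (h : iN < a.length) : pvRowN a iN = a[iN]'h := by
  simp [pvRowN, List.getElem?_eq_getElem h]

def pvRowAt (a : List (List Int)) (y : Int) : List Int := pvRowN a (pvIdx a.length y)

lemma pvRowAt_eq (a : List (List Int)) (y : Int) (h : PySem.Raise.InRange a.length y) :
    pvRowAt a y = a[pvIdx a.length y]'(pvIdx_lt _ _ h) := pvRowN_eq a _ (pvIdx_lt _ _ h)

lemma pvCell_wrap (a : List (List Int)) (y x v : Int) (h : PySem.Raise.InRange a.length y) :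
    pvCell a y x v = a.set (pvIdx a.length y) (PySem.List.pySetD (pvRowAt a y) x v) := by
  unfold pvCell
  rw [pySetD_wrap _ _ _ h,
    pyGetD_of_idx a y [] (pvIdx a.length y) (pyIdx?_wrap _ _ h) (pvIdx_lt _ _ h), pvRowAt_eq a y h]

lemma rowlen_pvCellW (a : List (List Int)) (y x v : Int) (iN : Nat) :
    (pvRowN (pvCell a y x v) iN).length = (pvRowN a iN).length := by
  unfold pvCell pvRowN
  simp only [PySem.List.pySetD, PySem.List.pySet?]
  cases hk : PySem.List.pyIdx? a.length y with
  | none => simp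
  | some k =>
    simp only [Option.map_some, Option.getD_some]
    have hkl := pyIdx?_lt _ _ _ hk
    rw [List.getElem?_set]
    by_cases hik : k = iN
    · subst hik
      rw [if_pos rfl, if_pos hkl, Option.getD_some, List.getElem?_eq_getElem hkl]
      show (PySem.List.pySetD (PySem.List.pyGetD a y []) x v).length = _
      rw [PySem.List.length_pySetD, pyGetD_of_idx a y [] k hk hkl]
      rfl
    · rw [if_neg hik]

lemma read_pvCellW (a : List (List Int)) (y x v : Int) (hy : PySem.Raise.InRange a.length y)
    (hx : PySem.Raise.InRange (pvRowAt a y).length x) (iN jN : Nat) (hiN : iN < a.length) :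
    pvRead (pvCell a y x v) (iN : Int) (jN : Int)
      = if pvIdx a.length y = iN ∧ pvIdx (pvRowN a iN).length x = jN then v
        else pvRead a (iN : Int) (jN : Int) := by
  rw [pvCell_wrap a y x v hy]
  unfold pvRead
  rw [pvGetD_nonneg _ _ (Int.natCast_nonneg iN), Int.toNat_natCast, List.getElem?_set]
  by_cases hik : pvIdx a.length y = iN
  · rw [if_pos hik, if_pos (pvIdx_lt a.length y hy), Option.getD_some,
      pySetD_wrap _ _ _ hx]
    rw [pvGetD_nonneg _ _ (Int.natCast_nonneg jN), Int.toNat_natCast, List.getElem?_set]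
    have hrow : pvRowAt a y = pvRowN a iN := by rw [pvRowAt, hik]
    by_cases hjx : pvIdx (pvRowN a iN).length x = jN
    · rw [if_pos (by rw [hrow] at *; exact hjx), if_pos]
      · simp [hik, hjx]
      · rw [hrow]
        rw [hrow] at hx
        have := pvIdx_lt (pvRowN a iN).length x hx
        omega
    · rw [if_neg (by rw [hrow] at *; exact hjx)]
      simp only [hik, hjx, and_false, if_false]
      rw [pvGetD_nonneg _ _ (Int.natCast_nonneg iN), Int.toNat_natCast,
        pvGetD_nonneg _ _ (Int.natCast_nonneg jN), Int.toNat_natCast]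
      rw [pvRowAt_eq a y hy] at hrow ⊢
      rw [List.getElem?_eq_getElem (by omega : iN < a.length)]
      simp [hik]
  · rw [if_neg hik]
    simp only [hik, false_and, if_false]
    rw [pvGetD_nonneg _ _ (Int.natCast_nonneg iN), Int.toNat_natCast]

lemma pvFoldW_len (v : Int) (L : List (Int × Int)) :
    ∀ a : List (List Int), (L.foldl (fun b p => pvCell b p.1 p.2 v) a).length = a.length := by
  induction L with
  | nil => simp
  | cons q T ih =>
    intro a
    simp only [List.foldl_cons]
    rw [ih, length_pvCell]

lemma pvFoldW_rowlen (v : Int) (L : List (Int × Int)) :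
    ∀ (a : List (List Int)) (iN : Nat),
      (pvRowN (L.foldl (fun b p => pvCell b p.1 p.2 v) a) iN).length = (pvRowN a iN).length := by
  induction L with
  | nil => simp
  | cons q T ih =>
    intro a iN
    simp only [List.foldl_cons]
    rw [ih, rowlen_pvCellW]

lemma pvFoldW_read (v : Int) (L : List (Int × Int)) :
    ∀ a : List (List Int),
    (∀ p ∈ L, PySem.Raise.InRange a.length p.1 ∧ PySem.Raise.InRange (pvRowAt a p.1).length p.2) →
    ∀ iN jN : Nat, iN < a.length →
    pvRead (L.foldl (fun b p => pvCell b p.1 p.2 v) a) (iN : Int) (jN : Int)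
      = if ∃ p ∈ L, pvIdx a.length p.1 = iN ∧ pvIdx (pvRowN a iN).length p.2 = jN then v
        else pvRead a (iN : Int) (jN : Int) := by
  induction L with
  | nil => simp
  | cons q T ih =>
    intro a hb iN jN hiN
    simp only [List.foldl_cons]
    have hq := hb q (by simp)
    have hlen : (pvCell a q.1 q.2 v).length = a.length := length_pvCell a q.1 q.2 v
    have hb' : ∀ p ∈ T, PySem.Raise.InRange (pvCell a q.1 q.2 v).length p.1 ∧
        PySem.Raise.InRange (pvRowAt (pvCell a q.1 q.2 v) p.1).length p.2 := by
      intro p hp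
      have h := hb p (List.mem_cons_of_mem _ hp)
      refine ⟨by rw [hlen]; exact h.1, ?_⟩
      have : (pvRowAt (pvCell a q.1 q.2 v) p.1).length = (pvRowAt a p.1).length := by
        unfold pvRowAt
        rw [hlen, rowlen_pvCellW]
      rw [this]
      exact h.2
    rw [ih (pvCell a q.1 q.2 v) hb' iN jN (by rw [hlen]; exact hiN)]
    have hrowe : (pvRowN (pvCell a q.1 q.2 v) iN).length = (pvRowN a iN).length :=
      rowlen_pvCellW a q.1 q.2 v iN
    simp only [hlen, hrowe]
    by_cases hmem : ∃ p ∈ T, pvIdx a.length p.1 = iN ∧ pvIdx (pvRowN a iN).length p.2 = jN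
    · rw [if_pos hmem]
      obtain ⟨p, hp, h1, h2⟩ := hmem
      rw [if_pos ⟨p, List.mem_cons_of_mem _ hp, h1, h2⟩]
    · rw [if_neg hmem, read_pvCellW a q.1 q.2 v hq.1 hq.2 iN jN hiN]
      by_cases he : pvIdx a.length q.1 = iN ∧ pvIdx (pvRowN a iN).length q.2 = jN
      · rw [if_pos he, if_pos ⟨q, by simp, he.1, he.2⟩]
      · rw [if_neg he, if_neg ?_]
        rintro ⟨p, hp, h1, h2⟩
        rcases List.mem_cons.mp hp with rfl | hm
        · exact he ⟨h1, h2⟩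
        · exact hmem ⟨p, hm, h1, h2⟩

lemma pvBoards_ext (A B : List (List Int)) (hlen : A.length = B.length)
    (hrow : ∀ iN : Nat, (pvRowN A iN).length = (pvRowN B iN).length)
    (hcell : ∀ iN jN : Nat, iN < A.length → pvRead A (iN : Int) (jN : Int) = pvRead B (iN : Int) (jN : Int)) :
    A = B := by
  apply List.ext_getElem hlen
  intro iN h1 h2
  apply List.ext_getElem
  · have h := hrow iN
    rw [pvRowN_eq A iN h1, pvRowN_eq B iN h2] at h
    exact h
  · intro jN hj1 hj2
    have h := hcell iN jN h1
    rw [pvRead_eq_getElem A iN jN h1 hj1, pvRead_eq_getElem B iN jN h2 hj2] at h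
    exact h

lemma pvRowAt_fold (v : Int) (L : List (Int × Int)) (a : List (List Int)) (z : Int) :
    (pvRowAt (L.foldl (fun b p => pvCell b p.1 p.2 v) a) z).length = (pvRowAt a z).length := by
  unfold pvRowAt
  rw [pvFoldW_len, pvFoldW_rowlen]

lemma pvPaint_eq (area : List (List Int)) (s2L oldL zeroL : List (Int × Int)) (color : Int)
    (hbO : ∀ p ∈ oldL, PySem.Raise.InRange area.length p.1 ∧ PySem.Raise.InRange (pvRowAt area p.1).length p.2)
    (hbN : ∀ p ∈ s2L, PySem.Raise.InRange area.length p.1 ∧ PySem.Raise.InRange (pvRowAt area p.1).length p.2)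
    (hbZ : ∀ p ∈ zeroL, PySem.Raise.InRange area.length p.1 ∧ PySem.Raise.InRange (pvRowAt area p.1).length p.2)
    (hcond : ∀ (P : Int × Int → Prop), (¬ ∃ p ∈ s2L, P p) → ((∃ p ∈ oldL, P p) ↔ (∃ p ∈ zeroL, P p))) :
    s2L.foldl (fun b p => pvCell b p.1 p.2 color) (oldL.foldl (fun b p => pvCell b p.1 p.2 0) area)
      = s2L.foldl (fun b p => pvCell b p.1 p.2 color) (zeroL.foldl (fun b p => pvCell b p.1 p.2 0) area) := by
  have hbO' : ∀ (w : Int), ∀ p ∈ s2L, PySem.Raise.InRange (oldL.foldl (fun b q => pvCell b q.1 q.2 0) area).length p.1 ∧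
      PySem.Raise.InRange (pvRowAt (oldL.foldl (fun b q => pvCell b q.1 q.2 0) area) p.1).length p.2 := by
    intro _ p hp
    have h := hbN p hp
    exact ⟨by rw [pvFoldW_len]; exact h.1, by rw [pvRowAt_fold]; exact h.2⟩
  have hbZ' : ∀ p ∈ s2L, PySem.Raise.InRange (zeroL.foldl (fun b q => pvCell b q.1 q.2 0) area).length p.1 ∧
      PySem.Raise.InRange (pvRowAt (zeroL.foldl (fun b q => pvCell b q.1 q.2 0) area) p.1).length p.2 := by
    intro p hp
    have h := hbN p hp
    exact ⟨by rw [pvFoldW_len]; exact h.1, by rw [pvRowAt_fold]; exact h.2⟩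
  apply pvBoards_ext
  · rw [pvFoldW_len, pvFoldW_len, pvFoldW_len, pvFoldW_len]
  · intro iN
    rw [pvFoldW_rowlen, pvFoldW_rowlen, pvFoldW_rowlen, pvFoldW_rowlen]
  · intro iN jN hiN
    rw [pvFoldW_len, pvFoldW_len] at hiN
    rw [pvFoldW_read color s2L _ (hbO' color) iN jN (by rw [pvFoldW_len]; exact hiN),
      pvFoldW_read color s2L _ hbZ' iN jN (by rw [pvFoldW_len]; exact hiN),
      pvFoldW_read 0 oldL area hbO iN jN hiN,
      pvFoldW_read 0 zeroL area hbZ iN jN hiN]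
    have hlO : (oldL.foldl (fun b q => pvCell b q.1 q.2 0) area).length = area.length := pvFoldW_len 0 oldL area
    have hlZ : (zeroL.foldl (fun b q => pvCell b q.1 q.2 0) area).length = area.length := pvFoldW_len 0 zeroL area
    have hrO : (pvRowN (oldL.foldl (fun b q => pvCell b q.1 q.2 0) area) iN).length = (pvRowN area iN).length := pvFoldW_rowlen 0 oldL area iN
    have hrZ : (pvRowN (zeroL.foldl (fun b q => pvCell b q.1 q.2 0) area) iN).length = (pvRowN area iN).length := pvFoldW_rowlen 0 zeroL area iN
    simp only [hlO, hlZ, hrO, hrZ]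
    by_cases hs2 : ∃ p ∈ s2L, pvIdx area.length p.1 = iN ∧ pvIdx (pvRowN area iN).length p.2 = jN
    · rw [if_pos hs2, if_pos hs2]
    · rw [if_neg hs2, if_neg hs2]
      have hiff := hcond (fun p => pvIdx area.length p.1 = iN ∧ pvIdx (pvRowN area iN).length p.2 = jN) hs2
      by_cases ho : ∃ p ∈ oldL, pvIdx area.length p.1 = iN ∧ pvIdx (pvRowN area iN).length p.2 = jN
      · rw [if_pos ho, if_pos (hiff.mp ho)]
      · rw [if_neg ho, if_neg (fun hz => ho (hiff.mpr hz))]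

lemma pvDiff_self (s : PySem.Set (Int × Int)) : PySem.Set.diff s s = [] := by
  rw [List.eq_nil_iff_forall_not_mem]
  intro x hx
  have h := (PySem.Set.mem_diff _ _ _).mp hx
  exact h.2 h.1

lemma pvRowAt_pyGetD (a : List (List Int)) (y : Int) (h : PySem.Raise.InRange a.length y) :
    PySem.List.pyGetD a y [] = pvRowAt a y := by
  rw [pyGetD_of_idx a y [] (pvIdx a.length y) (pyIdx?_wrap _ _ h) (pvIdx_lt _ _ h), pvRowAt_eq a y h]

lemma pvBoundsPairs (area shape : List (List Int))
    (hb : ∀ c ∈ shape, PySem.Raise.InRange area.length (PySem.List.pyGetD c 0 0) ∧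
        PySem.Raise.InRange (PySem.List.pyGetD area (PySem.List.pyGetD c 0 0) []).length (PySem.List.pyGetD c 1 0)) :
    ∀ p ∈ shape.map (fun c => (PySem.List.pyGetD c 0 0, PySem.List.pyGetD c 1 0)),
      PySem.Raise.InRange area.length p.1 ∧ PySem.Raise.InRange (pvRowAt area p.1).length p.2 := by
  intro p hp
  obtain ⟨c, hc, rfl⟩ := List.mem_map.mp hp
  have h := hb c hc
  exact ⟨h.1, by rw [← pvRowAt_pyGetD area _ h.1]; exact h.2⟩

-- checking all leading-edge target cells (set difference) = checking all cubes with a self-skip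
lemma pvDiffAll (olds : List (Int × Int)) (shift : Int × Int → Int × Int) (f : Int × Int → Bool) :
    (PySem.Set.diff (PySem.Set.ofList ((PySem.Set.ofList olds).map shift)) (PySem.Set.ofList olds)).all f
    = olds.all (fun p => f (shift p) || decide (shift p ∈ olds)) := by
  rw [Bool.eq_iff_iff]
  simp only [List.all_eq_true, PySem.Set.mem_diff, PySem.Set.mem_ofList, List.mem_map,
    Bool.or_eq_true, decide_eq_true_eq]
  constructor
  · intro h p hp
    by_cases hm : shift p ∈ olds
    · exact Or.inr hm
    · exact Or.inl (h _ ⟨⟨p, hp, rfl⟩, hm⟩)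
  · rintro h q ⟨⟨p, hp, rfl⟩, hq⟩
    rcases h p hp with h1 | h1
    · exact h1
    · exact absurd h1 hq

-- components of a cube after cube[1] += dx
lemma pvPairSet (c : List Int) (v : Int) (h : 2 ≤ c.length) :
    PySem.List.pyGetD (PySem.List.pySetD c 1 v) 0 0 = PySem.List.pyGetD c 0 0 ∧
    PySem.List.pyGetD (PySem.List.pySetD c 1 v) 1 0 = v := by
  match c, h with
  | a :: b :: t, _ => simp [pysem]

lemma pvPairsMem (shape : List (List Int)) (q : Int × Int) :
    (q ∈ shape.map (fun c => (PySem.List.pyGetD c 0 0, PySem.List.pyGetD c 1 0)))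
    ↔ ∃ c ∈ shape, PySem.List.pyGetD c 0 0 = q.1 ∧ PySem.List.pyGetD c 1 0 = q.2 := by
  rw [List.mem_map]
  constructor
  · rintro ⟨c, hc, rfl⟩
    exact ⟨c, hc, rfl, rfl⟩
  · rintro ⟨c, hc, h1, h2⟩
    exact ⟨c, hc, by rw [h1, h2]⟩

lemma pvColsEq (area : List (List Int)) :
    (if area = [] then (0:Int) else ((area.headD []).length : Int)) = ((area.headD []).length : Int) := by
  split_ifs with h
  · simp [h]
  · rfl

lemma pvFold_pairs (v : Int) (shape : List (List Int)) (a : List (List Int)) :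
    shape.foldl (fun b c => pvCell b (PySem.List.pyGetD c 0 0) (PySem.List.pyGetD c 1 0) v) a
      = (shape.map (fun c => (PySem.List.pyGetD c 0 0, PySem.List.pyGetD c 1 0))).foldl
          (fun b p => pvCell b p.1 p.2 v) a := by
  rw [List.foldl_map]

-- erase-all then repaint-all in place equals painting once (the zeros are fully masked)
lemma pvRepaint_eq (area shape : List (List Int)) (color : Int)
    (hb : ∀ c ∈ shape, PySem.Raise.InRange area.length (PySem.List.pyGetD c 0 0) ∧
        PySem.Raise.InRange (PySem.List.pyGetD area (PySem.List.pyGetD c 0 0) []).length (PySem.List.pyGetD c 1 0)) :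
    pvPrintShape (pvPrintShape area shape 0) shape color
      = shape.foldl (fun b c => pvCell b (PySem.List.pyGetD c 0 0) (PySem.List.pyGetD c 1 0) color) area := by
  have hbp := pvBoundsPairs area shape hb
  unfold pvPrintShape
  rw [pvFold_pairs 0, pvFold_pairs color, pvFold_pairs color]
  exact pvPaint_eq area _ _ [] color hbp hbp (by simp)
    (fun P hns2 => ⟨fun h => absurd h hns2, fun h => by simp at h⟩)

theorem main_eq_empty (area : List (List Int)) (color dir : Int) :
    move_shape area [] color dir = move_shape_alt area [] color dir := by
  simp only [move_shape, move_shape_alt, pvPrintShape, List.foldl_nil, List.map_nil,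
    PySem.Set.ofList_nil, ite_self, pvDiff_self]

theorem main_eq_other (area shape : List (List Int)) (color dir : Int)
    (h0 : dir ≠ 0) (h1 : dir ≠ 1)
    (hb : ∀ c ∈ shape, PySem.Raise.InRange area.length (PySem.List.pyGetD c 0 0) ∧
        PySem.Raise.InRange (PySem.List.pyGetD area (PySem.List.pyGetD c 0 0) []).length (PySem.List.pyGetD c 1 0)) :
    move_shape area shape color dir = move_shape_alt area shape color dir := by
  have hpaint := pvRepaint_eq area shape color hb
  simp only [move_shape, move_shape_alt]
  -- direction not in {0,1}: no cube moves on either side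
  have hres : shape.foldl (fun res c =>
      if PySem.List.pyGetD (pvPossibleMove (pvPrintShape area shape 0) (PySem.List.pyGetD c 1 0) (PySem.List.pyGetD c 0 0)) dir false = false then
        if dir = 0 then
          if [PySem.List.pyGetD c 0 0, PySem.List.pyGetD c 1 0 + 1] ∈ shape then res else false
        else if dir = 1 then
          if [PySem.List.pyGetD c 0 0, PySem.List.pyGetD c 1 0 - 1] ∈ shape then res else false
        else res
      else res) true = true := by
    rw [PySem.List.foldl_congr_mem' _ _ (fun res _ => res) true (by
      intro c hc res
      simp [h0, h1])]
    exact PySem.List.foldl_ignore shape true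
  simp only [hres]
  simp only [if_neg h0, if_neg h1, if_true, List.map_id']
  simp only [show (decide ((0:Int) ≠ 0)) = false from rfl, Bool.false_and,
    Bool.false_eq_true, if_false, pvDiff_self, List.foldl_nil]
  exact Prod.ext rfl hpaint
theorem main_eq0 (area shape : List (List Int)) (color : Int)
    (hrect : ∀ row ∈ area, row.length = (area.headD []).length)
    (hlen2 : ∀ c ∈ shape, 2 ≤ c.length)
    (hb : ∀ c ∈ shape, 0 ≤ PySem.List.pyGetD c 0 0 ∧ PySem.List.pyGetD c 0 0 < (area.length : Int) ∧
        0 ≤ PySem.List.pyGetD c 1 0 ∧ PySem.List.pyGetD c 1 0 < ((area.headD []).length : Int)) :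
    move_shape area shape color 0 = move_shape_alt area shape color 0 := by
  have hbb : ∀ c ∈ shape, 0 ≤ PySem.List.pyGetD c 0 0 ∧ PySem.List.pyGetD c 0 0 < (area.length : Int) ∧
      0 ≤ PySem.List.pyGetD c 1 0 ∧ PySem.List.pyGetD c 1 0 < (pvRowLen area (PySem.List.pyGetD c 0 0) : Int) := by
    intro c hc
    have h := hb c hc
    exact ⟨h.1, h.2.1, h.2.2.1, by rw [rowlen_rect area hrect h.1 h.2.1]; exact h.2.2.2⟩
  simp only [move_shape, move_shape_alt]
  simp only [show ((0:Int) = 1) = False from by simp, if_true, if_false, pvColsEq,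
    show (decide ((1:Int) ≠ 0)) = true from rfl, Bool.true_and]
  -- A's blocked test per cube, as a Bool predicate
  have hcong := PySem.List.foldl_congr_mem' shape
    (fun res c =>
      if PySem.List.pyGetD (pvPossibleMove (pvPrintShape area shape 0) (PySem.List.pyGetD c 1 0) (PySem.List.pyGetD c 0 0)) 0 false = false then
        if [PySem.List.pyGetD c 0 0, PySem.List.pyGetD c 1 0 + 1] ∈ shape then res else false
      else res)
    (fun res c =>
      if (decide (PySem.List.pyGetD (pvPossibleMove (pvPrintShape area shape 0) (PySem.List.pyGetD c 1 0) (PySem.List.pyGetD c 0 0)) 0 false = false) &&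
          !decide ([PySem.List.pyGetD c 0 0, PySem.List.pyGetD c 1 0 + 1] ∈ shape)) = true then false else res)
    true
    (by
      intro c hc res
      by_cases hmv : PySem.List.pyGetD (pvPossibleMove (pvPrintShape area shape 0) (PySem.List.pyGetD c 1 0) (PySem.List.pyGetD c 0 0)) 0 false = false <;>
        by_cases hmem : [PySem.List.pyGetD c 0 0, PySem.List.pyGetD c 1 0 + 1] ∈ shape <;>
          simp [hmv, hmem])
  rw [hcong, PySem.List.foldl_if_false_eq, Bool.true_and]
  -- A's allow bit equals B's leading-edge check
  have hAB : (!shape.any (fun c =>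
      decide (PySem.List.pyGetD (pvPossibleMove (pvPrintShape area shape 0) (PySem.List.pyGetD c 1 0) (PySem.List.pyGetD c 0 0)) 0 false = false) &&
      !decide ([PySem.List.pyGetD c 0 0, PySem.List.pyGetD c 1 0 + 1] ∈ shape)))
      = ((PySem.Set.diff
            (PySem.Set.ofList ((PySem.Set.ofList (shape.map (fun c => (PySem.List.pyGetD c 0 0, PySem.List.pyGetD c 1 0)))).map
              (fun p => (p.1, p.2 + 1))))
            (PySem.Set.ofList (shape.map (fun c => (PySem.List.pyGetD c 0 0, PySem.List.pyGetD c 1 0))))).all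
          (fun p => decide (0 ≤ p.1) && decide (p.1 < (area.length : Int)) && decide (0 ≤ p.2) &&
            decide (p.2 < ((area.headD []).length : Int)) &&
            decide (PySem.List.pyGetD (PySem.List.pyGetD area p.1 []) p.2 0 = 0))) := by
    rw [pvDiffAll, List.not_any_eq_all_not, List.all_map]
    have hcall : ∀ (f h : List Int → Bool), (∀ c ∈ shape, f c = h c) → shape.all f = shape.all h := by
      intro f h hfh
      rw [← Bool.not_not (shape.all f), ← Bool.not_not (shape.all h), List.not_all_eq_any_not,
        List.not_all_eq_any_not, PySem.List.any_congr_mem (fun c hc => by rw [hfh c hc])]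
    apply hcall
    intro c hc
    have h := hb c hc
    have hk := pvKeyR area shape hrect hb h.1 h.2.1 h.2.2.1 h.2.2.2
    have hlenr : ((PySem.List.pyGetD area (PySem.List.pyGetD c 0 0) []).length : Int)
        = ((area.headD []).length : Int) := by
      have hr := rowlen_rect area hrect h.1 h.2.1
      unfold pvRowLen at hr
      rw [hr]
    rw [hlenr] at hk
    exact hk
  simp only [hAB]
  -- both sides now branch on the same Bool
  rcases hX : ((PySem.Set.diff
      (PySem.Set.ofList ((PySem.Set.ofList (shape.map (fun c => (PySem.List.pyGetD c 0 0, PySem.List.pyGetD c 1 0)))).map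
        (fun p => (p.1, p.2 + 1))))
      (PySem.Set.ofList (shape.map (fun c => (PySem.List.pyGetD c 0 0, PySem.List.pyGetD c 1 0))))).all
      (fun p => decide (0 ≤ p.1) && decide (p.1 < (area.length : Int)) && decide (0 ≤ p.2) &&
        decide (p.2 < ((area.headD []).length : Int)) &&
        decide (PySem.List.pyGetD (PySem.List.pyGetD area p.1 []) p.2 0 = 0))) with _ | _
  · -- blocked: nothing moves
    simp only [hX, Bool.false_eq_true, if_false, pvDiff_self, List.foldl_nil]
    exact Prod.ext rfl (pvRepaint_eq area shape color (by
      intro c hc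
      have h := hbb c hc
      unfold pvRowLen at h
      exact ⟨⟨by omega, h.2.1⟩, ⟨by omega, h.2.2.2⟩⟩))
  · -- the move goes through
    simp only [hX, if_true]
    have hall := hX
    rw [pvDiffAll, List.all_eq_true] at hall
    -- every target cell of the moved shape is a legal cell
    have hbN : ∀ p ∈ (shape.map (fun c => (PySem.List.pyGetD c 0 0, PySem.List.pyGetD c 1 0))).map
        (fun p => (p.1, p.2 + 1)),
        PySem.Raise.InRange area.length p.1 ∧ PySem.Raise.InRange (pvRowAt area p.1).length p.2 := by
      intro p hp
      obtain ⟨q, hq, rfl⟩ := List.mem_map.mp hp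
      have hx := hall q hq
      rcases Bool.or_eq_true _ _ |>.mp hx with hgood | hmem
      · simp only [Bool.and_eq_true, decide_eq_true_eq] at hgood
        obtain ⟨⟨⟨⟨hy0, hy1⟩, hx0⟩, hx1⟩, -⟩ := hgood
        have hrl : (pvRowAt area q.1).length = (area.headD []).length := by
          have hr := rowlen_rect area hrect hy0 hy1
          unfold pvRowLen at hr
          rw [← pvRowAt_pyGetD area q.1 ⟨by omega, hy1⟩]
          exact hr
        exact ⟨⟨by omega, hy1⟩, by rw [hrl]; exact ⟨by omega, hx1⟩⟩
      · rw [decide_eq_true_eq] at hmem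
        obtain ⟨c'', hc'', h1, h2⟩ := (pvPairsMem shape _).mp hmem
        have h'' := hbb c'' hc''
        unfold pvRowLen at h''
        rw [h1, h2] at h''
        refine ⟨⟨by omega, h''.2.1⟩, ?_⟩
        rw [← pvRowAt_pyGetD area _ ⟨by omega, h''.2.1⟩]
        exact ⟨by omega, h''.2.2.2⟩
    have hbO : ∀ p ∈ shape.map (fun c => (PySem.List.pyGetD c 0 0, PySem.List.pyGetD c 1 0)),
        PySem.Raise.InRange area.length p.1 ∧ PySem.Raise.InRange (pvRowAt area p.1).length p.2 := by
      apply pvBoundsPairs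
      intro c hc
      have h := hbb c hc
      unfold pvRowLen at h
      exact ⟨⟨by omega, h.2.1⟩, ⟨by omega, h.2.2.2⟩⟩
    -- the cube pairs after cube[1] += dx are the shifted old pairs
    have hs2pairs : (shape.map (fun c => PySem.List.pySetD c 1 (PySem.List.pyGetD c 1 0 + 1))).map
        (fun c => (PySem.List.pyGetD c 0 0, PySem.List.pyGetD c 1 0))
        = (shape.map (fun c => (PySem.List.pyGetD c 0 0, PySem.List.pyGetD c 1 0))).map
            (fun p => (p.1, p.2 + 1)) := by
      rw [List.map_map, List.map_map]
      refine List.map_congr_left (fun c hc => ?_)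
      simp only [Function.comp]
      rw [(pvPairSet c _ (hlen2 c hc)).1, (pvPairSet c _ (hlen2 c hc)).2]
    refine Prod.ext rfl ?_
    unfold pvPrintShape
    rw [pvFold_pairs color, pvFold_pairs 0, pvFold_pairs color, hs2pairs]
    apply pvPaint_eq area _ _ _ color hbO hbN
    · -- the vacated cells are legal cells
      intro p hp
      have hpd := (PySem.Set.mem_diff _ _ _).mp hp
      have hpo : p ∈ shape.map (fun c => (PySem.List.pyGetD c 0 0, PySem.List.pyGetD c 1 0)) := by
        have := hpd.1
        simp only [PySem.Set.mem_ofList] at this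
        exact this
      exact hbO p hpo
    · -- outside the new shape, old cells and vacated cells coincide
      intro P hns2
      constructor
      · rintro ⟨p, hp, hP⟩
        refine ⟨p, ?_, hP⟩
        apply (PySem.Set.mem_diff _ _ _).mpr
        refine ⟨by simp only [PySem.Set.mem_ofList]; exact hp, ?_⟩
        intro hmemneu
        simp only [PySem.Set.mem_ofList, List.mem_map] at hmemneu
        obtain ⟨q, hq, rfl⟩ := hmemneu
        exact hns2 ⟨(q.1, q.2 + 1), List.mem_map.mpr ⟨q, List.mem_map.mpr hq, rfl⟩, hP⟩
      · rintro ⟨p, hp, hP⟩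
        have hpd := (PySem.Set.mem_diff _ _ _).mp hp
        have hpo : p ∈ shape.map (fun c => (PySem.List.pyGetD c 0 0, PySem.List.pyGetD c 1 0)) := by
          have := hpd.1
          simp only [PySem.Set.mem_ofList] at this
          exact this
        exact ⟨p, hpo, hP⟩

theorem main_eq1 (area shape : List (List Int)) (color : Int)
    (hrect : ∀ row ∈ area, row.length = (area.headD []).length)
    (hlen2 : ∀ c ∈ shape, 2 ≤ c.length)
    (hb : ∀ c ∈ shape, 0 ≤ PySem.List.pyGetD c 0 0 ∧ PySem.List.pyGetD c 0 0 < (area.length : Int) ∧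
        0 ≤ PySem.List.pyGetD c 1 0 ∧ PySem.List.pyGetD c 1 0 < ((area.headD []).length : Int)) :
    move_shape area shape color 1 = move_shape_alt area shape color 1 := by
  have hbb : ∀ c ∈ shape, 0 ≤ PySem.List.pyGetD c 0 0 ∧ PySem.List.pyGetD c 0 0 < (area.length : Int) ∧
      0 ≤ PySem.List.pyGetD c 1 0 ∧ PySem.List.pyGetD c 1 0 < (pvRowLen area (PySem.List.pyGetD c 0 0) : Int) := by
    intro c hc
    have h := hb c hc
    exact ⟨h.1, h.2.1, h.2.2.1, by rw [rowlen_rect area hrect h.1 h.2.1]; exact h.2.2.2⟩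
  simp only [move_shape, move_shape_alt]
  simp only [show ((1:Int) = 0) = False from by simp, if_true, if_false, pvColsEq,
    show (decide ((-1:Int) ≠ 0)) = true from rfl, Bool.true_and,
    show (∀ z : Int, z + -1 = z - 1) from fun z => by ring]
  -- A's blocked test per cube, as a Bool predicate
  have hcong := PySem.List.foldl_congr_mem' shape
    (fun res c =>
      if PySem.List.pyGetD (pvPossibleMove (pvPrintShape area shape 0) (PySem.List.pyGetD c 1 0) (PySem.List.pyGetD c 0 0)) 1 false = false then
        if [PySem.List.pyGetD c 0 0, PySem.List.pyGetD c 1 0 - 1] ∈ shape then res else false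
      else res)
    (fun res c =>
      if (decide (PySem.List.pyGetD (pvPossibleMove (pvPrintShape area shape 0) (PySem.List.pyGetD c 1 0) (PySem.List.pyGetD c 0 0)) 1 false = false) &&
          !decide ([PySem.List.pyGetD c 0 0, PySem.List.pyGetD c 1 0 - 1] ∈ shape)) = true then false else res)
    true
    (by
      intro c hc res
      by_cases hmv : PySem.List.pyGetD (pvPossibleMove (pvPrintShape area shape 0) (PySem.List.pyGetD c 1 0) (PySem.List.pyGetD c 0 0)) 1 false = false <;>
        by_cases hmem : [PySem.List.pyGetD c 0 0, PySem.List.pyGetD c 1 0 - 1] ∈ shape <;>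
          simp [hmv, hmem])
  rw [hcong, PySem.List.foldl_if_false_eq, Bool.true_and]
  -- A's allow bit equals B's leading-edge check
  have hAB : (!shape.any (fun c =>
      decide (PySem.List.pyGetD (pvPossibleMove (pvPrintShape area shape 0) (PySem.List.pyGetD c 1 0) (PySem.List.pyGetD c 0 0)) 1 false = false) &&
      !decide ([PySem.List.pyGetD c 0 0, PySem.List.pyGetD c 1 0 - 1] ∈ shape)))
      = ((PySem.Set.diff
            (PySem.Set.ofList ((PySem.Set.ofList (shape.map (fun c => (PySem.List.pyGetD c 0 0, PySem.List.pyGetD c 1 0)))).map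
              (fun p => (p.1, p.2 - 1))))
            (PySem.Set.ofList (shape.map (fun c => (PySem.List.pyGetD c 0 0, PySem.List.pyGetD c 1 0))))).all
          (fun p => decide (0 ≤ p.1) && decide (p.1 < (area.length : Int)) && decide (0 ≤ p.2) &&
            decide (p.2 < ((area.headD []).length : Int)) &&
            decide (PySem.List.pyGetD (PySem.List.pyGetD area p.1 []) p.2 0 = 0))) := by
    rw [pvDiffAll, List.not_any_eq_all_not, List.all_map]
    have hcall : ∀ (f h : List Int → Bool), (∀ c ∈ shape, f c = h c) → shape.all f = shape.all h := by
      intro f h hfh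
      rw [← Bool.not_not (shape.all f), ← Bool.not_not (shape.all h), List.not_all_eq_any_not,
        List.not_all_eq_any_not, PySem.List.any_congr_mem (fun c hc => by rw [hfh c hc])]
    apply hcall
    intro c hc
    have h := hb c hc
    have hk := pvKeyL area shape hrect hb h.1 h.2.1 h.2.2.1 h.2.2.2
    have hlenr : ((PySem.List.pyGetD area (PySem.List.pyGetD c 0 0) []).length : Int)
        = ((area.headD []).length : Int) := by
      have hr := rowlen_rect area hrect h.1 h.2.1
      unfold pvRowLen at hr
      rw [hr]
    rw [hlenr] at hk
    exact hk
  simp only [hAB]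
  -- both sides now branch on the same Bool
  rcases hX : ((PySem.Set.diff
      (PySem.Set.ofList ((PySem.Set.ofList (shape.map (fun c => (PySem.List.pyGetD c 0 0, PySem.List.pyGetD c 1 0)))).map
        (fun p => (p.1, p.2 - 1))))
      (PySem.Set.ofList (shape.map (fun c => (PySem.List.pyGetD c 0 0, PySem.List.pyGetD c 1 0))))).all
      (fun p => decide (0 ≤ p.1) && decide (p.1 < (area.length : Int)) && decide (0 ≤ p.2) &&
        decide (p.2 < ((area.headD []).length : Int)) &&
        decide (PySem.List.pyGetD (PySem.List.pyGetD area p.1 []) p.2 0 = 0))) with _ | _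
  · -- blocked: nothing moves
    simp only [hX, Bool.false_eq_true, if_false, pvDiff_self, List.foldl_nil]
    exact Prod.ext rfl (pvRepaint_eq area shape color (by
      intro c hc
      have h := hbb c hc
      unfold pvRowLen at h
      exact ⟨⟨by omega, h.2.1⟩, ⟨by omega, h.2.2.2⟩⟩))
  · -- the move goes through
    simp only [hX, if_true]
    have hall := hX
    rw [pvDiffAll, List.all_eq_true] at hall
    -- every target cell of the moved shape is a legal cell
    have hbN : ∀ p ∈ (shape.map (fun c => (PySem.List.pyGetD c 0 0, PySem.List.pyGetD c 1 0))).map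
        (fun p => (p.1, p.2 - 1)),
        PySem.Raise.InRange area.length p.1 ∧ PySem.Raise.InRange (pvRowAt area p.1).length p.2 := by
      intro p hp
      obtain ⟨q, hq, rfl⟩ := List.mem_map.mp hp
      have hx := hall q hq
      rcases Bool.or_eq_true _ _ |>.mp hx with hgood | hmem
      · simp only [Bool.and_eq_true, decide_eq_true_eq] at hgood
        obtain ⟨⟨⟨⟨hy0, hy1⟩, hx0⟩, hx1⟩, -⟩ := hgood
        have hrl : (pvRowAt area q.1).length = (area.headD []).length := by
          have hr := rowlen_rect area hrect hy0 hy1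
          unfold pvRowLen at hr
          rw [← pvRowAt_pyGetD area q.1 ⟨by omega, hy1⟩]
          exact hr
        exact ⟨⟨by omega, hy1⟩, by rw [hrl]; exact ⟨by omega, hx1⟩⟩
      · rw [decide_eq_true_eq] at hmem
        obtain ⟨c'', hc'', h1, h2⟩ := (pvPairsMem shape _).mp hmem
        have h'' := hbb c'' hc''
        unfold pvRowLen at h''
        rw [h1, h2] at h''
        refine ⟨⟨by omega, h''.2.1⟩, ?_⟩
        rw [← pvRowAt_pyGetD area _ ⟨by omega, h''.2.1⟩]
        exact ⟨by omega, h''.2.2.2⟩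
    have hbO : ∀ p ∈ shape.map (fun c => (PySem.List.pyGetD c 0 0, PySem.List.pyGetD c 1 0)),
        PySem.Raise.InRange area.length p.1 ∧ PySem.Raise.InRange (pvRowAt area p.1).length p.2 := by
      apply pvBoundsPairs
      intro c hc
      have h := hbb c hc
      unfold pvRowLen at h
      exact ⟨⟨by omega, h.2.1⟩, ⟨by omega, h.2.2.2⟩⟩
    -- the cube pairs after cube[1] += dx are the shifted old pairs
    have hs2pairs : (shape.map (fun c => PySem.List.pySetD c 1 (PySem.List.pyGetD c 1 0 - 1))).map
        (fun c => (PySem.List.pyGetD c 0 0, PySem.List.pyGetD c 1 0))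
        = (shape.map (fun c => (PySem.List.pyGetD c 0 0, PySem.List.pyGetD c 1 0))).map
            (fun p => (p.1, p.2 - 1)) := by
      rw [List.map_map, List.map_map]
      refine List.map_congr_left (fun c hc => ?_)
      simp only [Function.comp]
      rw [(pvPairSet c _ (hlen2 c hc)).1, (pvPairSet c _ (hlen2 c hc)).2]
    refine Prod.ext rfl ?_
    unfold pvPrintShape
    rw [pvFold_pairs color, pvFold_pairs 0, pvFold_pairs color, hs2pairs]
    apply pvPaint_eq area _ _ _ color hbO hbN
    · -- the vacated cells are legal cells
      intro p hp
      have hpd := (PySem.Set.mem_diff _ _ _).mp hp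
      have hpo : p ∈ shape.map (fun c => (PySem.List.pyGetD c 0 0, PySem.List.pyGetD c 1 0)) := by
        have := hpd.1
        simp only [PySem.Set.mem_ofList] at this
        exact this
      exact hbO p hpo
    · -- outside the new shape, old cells and vacated cells coincide
      intro P hns2
      constructor
      · rintro ⟨p, hp, hP⟩
        refine ⟨p, ?_, hP⟩
        apply (PySem.Set.mem_diff _ _ _).mpr
        refine ⟨by simp only [PySem.Set.mem_ofList]; exact hp, ?_⟩
        intro hmemneu
        simp only [PySem.Set.mem_ofList, List.mem_map] at hmemneu
        obtain ⟨q, hq, rfl⟩ := hmemneu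
        exact hns2 ⟨(q.1, q.2 - 1), List.mem_map.mpr ⟨q, List.mem_map.mpr hq, rfl⟩, hP⟩
      · rintro ⟨p, hp, hP⟩
        have hpd := (PySem.Set.mem_diff _ _ _).mp hp
        have hpo : p ∈ shape.map (fun c => (PySem.List.pyGetD c 0 0, PySem.List.pyGetD c 1 0)) := by
          have := hpd.1
          simp only [PySem.Set.mem_ofList] at this
          exact this
        exact ⟨p, hpo, hP⟩


-- ===== VERDICT (by name: the statement is the Claim_ definition above) =====
theorem move_shape_spec : Claim_equal_move_shape := by
  intro area shape color dir _hdom hpre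
  show move_shape area shape color dir = move_shape_alt area shape color dir
  rcases hpre with rfl | ⟨_hdir, hcubes, hrect01⟩
  · exact main_eq_empty area color dir
  · have e0 : ∀ c : List Int, PySem.List.pyGetD c 0 0 = c.getD 0 0 := fun c => PySem.List.pyGetD_zero c 0
    have e1 : ∀ c : List Int, PySem.List.pyGetD c 1 0 = c.getD 1 0 := by
      intro c
      rw [pvGetD_nonneg _ _ (by omega : (0:Int) ≤ 1)]
      rfl
    have hlen2 : ∀ c ∈ shape, 2 ≤ c.length := fun c hc => (hcubes c hc).1
    have hbrow : ∀ c ∈ shape, PySem.Raise.InRange area.length (PySem.List.pyGetD c 0 0) ∧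
        PySem.Raise.InRange (PySem.List.pyGetD area (PySem.List.pyGetD c 0 0) []).length (PySem.List.pyGetD c 1 0) := by
      intro c hc
      have h := (hcubes c hc).2
      rw [e0, e1]
      exact h
    by_cases h0 : dir = 0
    · subst h0
      obtain ⟨hrect, hstrict⟩ := hrect01 (Or.inl rfl)
      have hb : ∀ c ∈ shape, 0 ≤ PySem.List.pyGetD c 0 0 ∧ PySem.List.pyGetD c 0 0 < (area.length : Int) ∧
          0 ≤ PySem.List.pyGetD c 1 0 ∧ PySem.List.pyGetD c 1 0 < ((area.headD []).length : Int) := by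
        intro c hc
        have h := hstrict c hc
        rw [e0, e1]
        exact h
      exact main_eq0 area shape color hrect hlen2 hb
    by_cases h1 : dir = 1
    · subst h1
      obtain ⟨hrect, hstrict⟩ := hrect01 (Or.inr rfl)
      have hb : ∀ c ∈ shape, 0 ≤ PySem.List.pyGetD c 0 0 ∧ PySem.List.pyGetD c 0 0 < (area.length : Int) ∧
          0 ≤ PySem.List.pyGetD c 1 0 ∧ PySem.List.pyGetD c 1 0 < ((area.headD []).length : Int) := by
        intro c hc
        have h := hstrict c hc
        rw [e0, e1]
        exact h
      exact main_eq1 area shape color hrect hlen2 hb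
    · exact main_eq_other area shape color dir h0 h1 hbrow
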